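-- pv_equiv track=rewrite | github.com/Karthikvce016/styleai | backend/app/services/stylist.py | _palette_temperature
-- ===== SOURCE A (Python) =====
-- def _palette_temperature(palette: list[str]) -> str | None:
--     warm = {"beige", "tan", "brown", "olive", "deep-green", "dark-brown", "stone"}
--     cool = {"white", "grey", "charcoal", "navy", "pastel-blue", "light-blue"}
--     p = {c.lower() for c in (palette or [])}
--     w = len(p & warm)
--     c = len(p & cool)
--     if w == 0 and c == 0:
--         return None
--     return "warm" if w >= c else "cool"
-- ===== SOURCE B (Python) =====
-- def _palette_temperature(palette: list[str]) -> str | None: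
--     warm = ("beige", "tan", "brown", "olive", "deep-green", "dark-brown", "stone")
--     cool = ("white", "grey", "charcoal", "navy", "pastel-blue", "light-blue")
--     seen = set()
--     score = 0   # (#warm seen) - (#cool seen)
--     hits = 0    # (#warm seen) + (#cool seen)
--     for raw in palette:
--         color = raw.lower()
--         if color in seen:
--             continue
--         seen.add(color)
--         if color in warm:
--             score += 1
--             hits += 1
--         elif color in cool:
--             score -= 1
--             hits += 1
--     if hits == 0:
--         return None
--     return "warm" if score >= 0 else "cool"
-- ===== Notes on version B (the rewrite author's own statement) =====
-- stated objective: alternative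
-- what changed: Instead of building the dedup set first and taking two set intersections and comparing their sizes, B makes one fused pass over the raw palette, deduplicating inline and maintaining a single signed warm-minus-cool score plus a hit counter, deciding from the score's sign.
import Mathlib
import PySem

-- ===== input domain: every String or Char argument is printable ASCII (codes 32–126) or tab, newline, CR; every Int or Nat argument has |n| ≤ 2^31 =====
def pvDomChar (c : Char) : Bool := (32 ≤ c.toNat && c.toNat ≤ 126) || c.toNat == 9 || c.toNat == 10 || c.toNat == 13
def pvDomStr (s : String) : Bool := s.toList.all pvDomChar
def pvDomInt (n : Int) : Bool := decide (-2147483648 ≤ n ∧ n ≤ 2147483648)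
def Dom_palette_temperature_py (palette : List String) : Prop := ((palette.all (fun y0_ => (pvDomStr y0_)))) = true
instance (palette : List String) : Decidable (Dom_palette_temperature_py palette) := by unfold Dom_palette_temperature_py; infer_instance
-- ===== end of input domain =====

-- B replaces A's staged dedup-then-two-set-intersections by one fused pass over the raw
-- palette that dedups inline and keeps a signed warm-minus-cool score and a hit counter,
-- deciding from the score's sign (objective: alternative).

-- ===== PORT A =====
def palette_temperature_py (palette : List String) : Option String :=
  let warm : PySem.Set String :=
    PySem.Set.ofList ["beige", "tan", "brown", "olive", "deep-green", "dark-brown", "stone"]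
  let cool : PySem.Set String :=
    PySem.Set.ofList ["white", "grey", "charcoal", "navy", "pastel-blue", "light-blue"]
  let p : PySem.Set String := PySem.Set.ofList (palette.map PySem.Str.lower)
  let w : Int := PySem.Set.len (PySem.Set.inter p warm)
  let c : Int := PySem.Set.len (PySem.Set.inter p cool)
  if w = 0 ∧ c = 0 then none
  else if w ≥ c then some "warm" else some "cool"

-- ===== PORT B =====
-- Source B's warm/cool tuples
def pvWarmL : List String := ["beige", "tan", "brown", "olive", "deep-green", "dark-brown", "stone"]
def pvCoolL : List String := ["white", "grey", "charcoal", "navy", "pastel-blue", "light-blue"]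

-- one iteration of Source B's loop body on the state (seen, score, hits)
def pvStep (st : PySem.Set String × Int × Int) (raw : String) : PySem.Set String × Int × Int :=
  let color := PySem.Str.lower raw
  if PySem.Set.contains st.1 color then st
  else
    let seen := PySem.Set.add st.1 color
    if color ∈ pvWarmL then (seen, st.2.1 + 1, st.2.2 + 1)
    else if color ∈ pvCoolL then (seen, st.2.1 - 1, st.2.2 + 1)
    else (seen, st.2.1, st.2.2)

def palette_temperature_py_alt (palette : List String) : Option String :=
  let st := palette.foldl pvStep (PySem.Set.empty, 0, 0)
  if st.2.2 = 0 then none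
  else if st.2.1 ≥ 0 then some "warm" else some "cool"

-- ===== PRECONDITION & SPEC =====
def Spec_palette_temperature_py (palette : List String) (out : Option String) : Prop := out = palette_temperature_py_alt palette
instance (palette : List String) (out : Option String) : Decidable (Spec_palette_temperature_py palette out) := by unfold Spec_palette_temperature_py; infer_instance

-- ===== CLAIM (what is proved, stated in full; the proofs are below) =====
def Claim_equal_palette_temperature_py : Prop := ∀ (palette : List String), Dom_palette_temperature_py palette → Spec_palette_temperature_py palette (palette_temperature_py palette)

-- ===== LEMMAS AND PROOFS =====

-- number of warm / cool strings in a list (as an Int)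
def pvW (s : List String) : Int := (s.countP (fun x => decide (x ∈ pvWarmL)) : Int)
def pvC (s : List String) : Int := (s.countP (fun x => decide (x ∈ pvCoolL)) : Int)

theorem pv_disj (x : String) (h : x ∈ pvWarmL) : x ∉ pvCoolL := by
  fin_cases h <;> decide

theorem pv_add_of_contains (s : PySem.Set String) (x : String)
    (h : PySem.Set.contains s x = true) : PySem.Set.add s x = s := by
  have hx : x ∈ s := (PySem.Set.contains_iff s x).mp h
  simp [PySem.Set.add, hx]

theorem pv_add_of_not_contains (s : PySem.Set String) (x : String)
    (h : ¬ PySem.Set.contains s x = true) : PySem.Set.add s x = s ++ [x] := by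
  have hx : x ∉ s := fun hm => h ((PySem.Set.contains_iff s x).mpr hm)
  simp [PySem.Set.add, hx]

-- loop invariant: the fold returns the inline-deduplicated set together with
-- score = ΔpvW - ΔpvC and hits = ΔpvW + ΔpvC relative to the starting set
theorem pv_fold_inv (l : List String) (s : PySem.Set String) (z m : Int) :
    l.foldl pvStep (s, z, m) =
      (List.foldl PySem.Set.add s (l.map PySem.Str.lower),
       z + (pvW (List.foldl PySem.Set.add s (l.map PySem.Str.lower)) - pvW s)
         - (pvC (List.foldl PySem.Set.add s (l.map PySem.Str.lower)) - pvC s),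
       m + (pvW (List.foldl PySem.Set.add s (l.map PySem.Str.lower)) - pvW s)
         + (pvC (List.foldl PySem.Set.add s (l.map PySem.Str.lower)) - pvC s)) := by
  induction l generalizing s z m with
  | nil => simp
  | cons x xs ih =>
    simp only [List.foldl_cons, List.map_cons]
    by_cases h : PySem.Set.contains s (PySem.Str.lower x) = true
    · have hx : PySem.Str.lower x ∈ s := (PySem.Set.contains_iff s _).mp h
      rw [show pvStep (s, z, m) x = (s, z, m) by simp [pvStep, hx],
        pv_add_of_contains s _ h, ih]
    · have hx : PySem.Str.lower x ∉ s := fun hm => h ((PySem.Set.contains_iff s _).mpr hm)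
      rw [pv_add_of_not_contains s _ h]
      have hW : pvW (s ++ [PySem.Str.lower x]) =
          pvW s + (if PySem.Str.lower x ∈ pvWarmL then 1 else 0) := by
        simp [pvW, List.countP_append, List.countP_cons]
      have hC : pvC (s ++ [PySem.Str.lower x]) =
          pvC s + (if PySem.Str.lower x ∈ pvCoolL then 1 else 0) := by
        simp [pvC, List.countP_append, List.countP_cons]
      by_cases hw : PySem.Str.lower x ∈ pvWarmL
      · have hc := pv_disj _ hw
        rw [show pvStep (s, z, m) x = (s ++ [PySem.Str.lower x], z + 1, m + 1) by
            simp [pvStep, hx, hw], ih]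
        simp [hW, hC, hw, hc, Prod.ext_iff]
        omega
      · by_cases hc : PySem.Str.lower x ∈ pvCoolL
        · rw [show pvStep (s, z, m) x = (s ++ [PySem.Str.lower x], z - 1, m + 1) by
              simp [pvStep, hx, hw, hc], ih]
          simp [hW, hC, hw, hc, Prod.ext_iff]
          omega
        · rw [show pvStep (s, z, m) x = (s ++ [PySem.Str.lower x], z, m) by
              simp [pvStep, hx, hw, hc], ih]
          simp [hW, hC, hw, hc]

-- |s ∩ t| counted as a filter over s
theorem pv_len_inter (s t : PySem.Set String) :
    PySem.Set.len (PySem.Set.inter s t) =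
      ((s : List String).countP (fun x => PySem.Set.contains t x) : Int) := by
  simp [PySem.Set.len, PySem.Set.inter, List.countP_eq_length_filter]

-- ===== VERDICT (by name: the statement is the Claim_ definition above) =====
theorem palette_temperature_py_spec : Claim_equal_palette_temperature_py := by
  intro palette _
  unfold Spec_palette_temperature_py palette_temperature_py palette_temperature_py_alt
  have hWcnt : ∀ pL : List String,
      (pL.countP (fun x => PySem.Set.contains
          (PySem.Set.ofList ["beige", "tan", "brown", "olive", "deep-green", "dark-brown", "stone"]) x) : Int)
        = pvW pL := by
    intro pL
    unfold pvW
    congr 1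
    apply List.countP_congr
    intro x _
    rw [Bool.eq_iff_iff, PySem.Set.contains_iff, decide_eq_true_iff, PySem.Set.mem_ofList]
    simp [pvWarmL]
  have hCcnt : ∀ pL : List String,
      (pL.countP (fun x => PySem.Set.contains
          (PySem.Set.ofList ["white", "grey", "charcoal", "navy", "pastel-blue", "light-blue"]) x) : Int)
        = pvC pL := by
    intro pL
    unfold pvC
    congr 1
    apply List.countP_congr
    intro x _
    rw [Bool.eq_iff_iff, PySem.Set.contains_iff, decide_eq_true_iff, PySem.Set.mem_ofList]
    simp [pvCoolL]
  have hfold := pv_fold_inv palette PySem.Set.empty 0 0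
  have hp : PySem.Set.ofList (palette.map PySem.Str.lower) =
      List.foldl PySem.Set.add PySem.Set.empty (palette.map PySem.Str.lower) :=
    PySem.Set.ofList_eq_foldl _
  show (if _ then _ else _) = _
  rw [hfold]
  simp only [pv_len_inter, ← hp, hWcnt, hCcnt]
  have h0 : pvW PySem.Set.empty = 0 := by decide
  have h0' : pvC PySem.Set.empty = 0 := by decide
  rw [h0, h0']
  have hWnn : 0 ≤ pvW (PySem.Set.ofList (palette.map PySem.Str.lower)) := by
    simp [pvW]
  have hCnn : 0 ≤ pvC (PySem.Set.ofList (palette.map PySem.Str.lower)) := by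
    simp [pvC]
  split_ifs <;> first | rfl | omega
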